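-- pv_equiv track=rewrite | github.com/mrkajetanp/programming-exercises | CodeWars/Mathematics/IntegersRecreationTwo/IntegersRecreationTwo.py | prod2sum
-- ===== SOURCE A (Python) =====
-- def prod2sum(a, b, c, d):
--     result = []
--     n = (a*a + b*b) * (c*c + d*d)
--     sums = [abs(a*c+b*d), abs(a*d+b*c), abs(a*c-b*d), abs(a*d-b*c)]
--
--     for i in range(0, len(sums)):
--         for j in range(0, len(sums)):
--             if sums[i]**2 + sums[j]**2 == n:
--                 pair = [min(sums[i], sums[j]), max(sums[i], sums[j])]
--
--                 if pair not in result: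
--                     result.append(pair)
--
--     return sorted(result)
-- ===== SOURCE B (Python) =====
-- def prod2sum(a, b, c, d):
--     x, y = abs(a*c + b*d), abs(a*d - b*c)
--     u, v = abs(a*c - b*d), abs(a*d + b*c)
--     p1 = [min(x, y), max(x, y)]
--     p2 = [min(u, v), max(u, v)]
--     pairs = [p1] if p1 == p2 else [p1, p2]
--     return sorted(pairs)
-- ===== Notes on version B (the rewrite author's own statement) =====
-- stated objective: simpler
-- what changed: B replaces the 4x4 nested search over all index pairs (with a quadratic membership test) by directly constructing the two Brahmagupta-Fibonacci decompositions (|ac+bd|,|ad-bc|) and (|ac-bd|,|ad+bc|), deduplicating the two pairs and sorting.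
import Mathlib
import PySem

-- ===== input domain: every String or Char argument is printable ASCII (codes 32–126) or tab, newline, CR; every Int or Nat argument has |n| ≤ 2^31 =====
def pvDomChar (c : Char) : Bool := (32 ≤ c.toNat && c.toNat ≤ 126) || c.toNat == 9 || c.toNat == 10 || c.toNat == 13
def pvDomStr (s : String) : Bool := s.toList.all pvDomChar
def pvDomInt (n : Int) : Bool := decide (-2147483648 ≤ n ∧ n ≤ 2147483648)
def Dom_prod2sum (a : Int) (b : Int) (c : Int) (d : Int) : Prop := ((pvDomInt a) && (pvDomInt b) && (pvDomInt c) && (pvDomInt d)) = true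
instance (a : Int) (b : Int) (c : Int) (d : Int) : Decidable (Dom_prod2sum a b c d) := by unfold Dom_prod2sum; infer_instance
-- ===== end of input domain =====

-- B replaces A's 4x4 nested index search (with membership dedup) by directly constructing the two
-- Brahmagupta-Fibonacci decompositions, deduplicating the two candidate pairs and sorting (objective: simpler).


-- ===== PORT A =====
def prod2sum (a : Int) (b : Int) (c : Int) (d : Int) : List (List Int) :=
  let n := (a*a + b*b) * (c*c + d*d)
  let sums : List Int := [|a*c+b*d|, |a*d+b*c|, |a*c-b*d|, |a*d-b*c|]
  let result := (PySem.List.pyRange 0 (PySem.List.len sums) 1).foldl (fun res i =>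
    (PySem.List.pyRange 0 (PySem.List.len sums) 1).foldl (fun res j =>
      -- sums[i], sums[j]: the indices produced by range(len(sums)) are always in range
      match PySem.List.pyGet? sums i, PySem.List.pyGet? sums j with
      | some si, some sj =>
        if si ^ 2 + sj ^ 2 = n then
          let pair := [min si sj, max si sj]
          if pair ∈ res then res else res ++ [pair]
        else res
      | _, _ => res) res) []
  PySem.List.sorted result (fun x => x) false

-- ===== PORT B =====
def prod2sum_alt (a : Int) (b : Int) (c : Int) (d : Int) : List (List Int) :=
  let x := |a*c + b*d|
  let y := |a*d - b*c|
  let u := |a*c - b*d|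
  let v := |a*d + b*c|
  let p1 := [min x y, max x y]
  let p2 := [min u v, max u v]
  let pairs := if p1 = p2 then [p1] else [p1, p2]
  PySem.List.sorted pairs (fun z => z) false

-- ===== PRECONDITION & SPEC =====
def Spec_prod2sum (a : Int) (b : Int) (c : Int) (d : Int) (out : List (List Int)) : Prop := out = prod2sum_alt a b c d
instance (a : Int) (b : Int) (c : Int) (d : Int) (out : List (List Int)) : Decidable (Spec_prod2sum a b c d out) := by unfold Spec_prod2sum; infer_instance

-- ===== CLAIM (what is proved, stated in full; the proofs are below) =====
def Claim_equal_prod2sum : Prop := ∀ (a : Int) (b : Int) (c : Int) (d : Int), Dom_prod2sum a b c d → Spec_prod2sum a b c d (prod2sum a b c d)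

-- ===== LEMMAS AND PROOFS =====

-- One iteration of A's inner loop, on the element sums[j] (= sj) for fixed sums[i] (= si).
def pvStep (n si : Int) (res : List (List Int)) (sj : Int) : List (List Int) :=
  if si ^ 2 + sj ^ 2 = n then
    if [min si sj, max si sj] ∈ res then res else res ++ [[min si sj, max si sj]]
  else res

theorem pv_key (y u : Int) (hy : 0 ≤ y) (hu : 0 ≤ u) (h : y^2 = u^2) : y = u := by
  nlinarith [sq_nonneg (y - u), sq_nonneg (y + u)]

-- If the row's pair is already present, the row is a no-op.
theorem pv_fold_mem (n si t : Int) (L : List Int) (res : List (List Int))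
    (hcond : ∀ x ∈ L, (si ^ 2 + x ^ 2 = n ↔ x = t))
    (hP : [min si t, max si t] ∈ res) :
    L.foldl (pvStep n si) res = res := by
  induction L generalizing res with
  | nil => rfl
  | cons x L ih =>
    simp only [List.foldl]
    by_cases h : si ^ 2 + x ^ 2 = n
    · have hxt : x = t := (hcond x (by simp)).mp h
      subst hxt
      simp only [pvStep, if_pos h, if_pos hP]
      exact ih _ (fun y hy => hcond y (by simp [hy])) hP
    · simp only [pvStep, if_neg h]
      exact ih _ (fun y hy => hcond y (by simp [hy])) hP

-- A row whose matching condition is "x = t", with t occurring in L, appends exactly its pair (if new).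
theorem pv_fold_add (n si t : Int) (L : List Int) (res : List (List Int))
    (hcond : ∀ x ∈ L, (si ^ 2 + x ^ 2 = n ↔ x = t)) (ht : t ∈ L) :
    L.foldl (pvStep n si) res =
      if [min si t, max si t] ∈ res then res else res ++ [[min si t, max si t]] := by
  induction L generalizing res with
  | nil => cases ht
  | cons x L ih =>
    simp only [List.foldl]
    by_cases hxt : x = t
    · subst hxt
      have hcx : si ^ 2 + x ^ 2 = n := (hcond x (by simp)).mpr rfl
      simp only [pvStep, if_pos hcx]
      by_cases hmem : [min si x, max si x] ∈ res
      · rw [if_pos hmem]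
        exact pv_fold_mem n si x L res (fun y hy => hcond y (by simp [hy])) hmem
      · rw [if_neg hmem]
        exact pv_fold_mem n si x L (res ++ [[min si x, max si x]])
          (fun y hy => hcond y (by simp [hy])) (by simp)
    · have hcx : ¬(si ^ 2 + x ^ 2 = n) := fun h => hxt ((hcond x (by simp)).mp h)
      simp only [pvStep, if_neg hcx]
      have ht' : t ∈ L := by
        rcases List.mem_cons.mp ht with h | h
        · exact absurd h.symm hxt
        · exact h
      exact ih _ (fun y hy => hcond y (by simp [hy])) ht'

set_option maxHeartbeats 1000000 in
theorem pv_core (p q r s n : Int) (hp : 0 ≤ p) (hq : 0 ≤ q) (hr : 0 ≤ r) (hs : 0 ≤ s)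
    (hps : p^2 + s^2 = n) (hqr : q^2 + r^2 = n) :
    ((PySem.List.pyRange 0 (PySem.List.len [p,q,r,s]) 1).foldl (fun res i =>
      (PySem.List.pyRange 0 (PySem.List.len [p,q,r,s]) 1).foldl (fun res j =>
        match PySem.List.pyGet? [p,q,r,s] i, PySem.List.pyGet? [p,q,r,s] j with
        | some si, some sj =>
          if si ^ 2 + sj ^ 2 = n then
            let pair := [min si sj, max si sj]
            if pair ∈ res then res else res ++ [pair]
          else res
        | _, _ => res) res) ([] : List (List Int)))
    = (if [min p s, max p s] = [min r q, max r q] then [[min p s, max p s]]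
       else [[min p s, max p s], [min r q, max r q]]) := by
  have c0 : ∀ y : Int, 0 ≤ y → ((p^2 + y^2 = n) ↔ y = s) := fun y hy =>
    ⟨fun h => pv_key y s hy hs (by linarith), fun h => by rw [h]; exact hps⟩
  have c1 : ∀ y : Int, 0 ≤ y → ((q^2 + y^2 = n) ↔ y = r) := fun y hy =>
    ⟨fun h => pv_key y r hy hr (by linarith), fun h => by rw [h]; exact hqr⟩
  have c2 : ∀ y : Int, 0 ≤ y → ((r^2 + y^2 = n) ↔ y = q) := fun y hy =>
    ⟨fun h => pv_key y q hy hq (by linarith), fun h => by rw [h]; linarith⟩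
  have c3 : ∀ y : Int, 0 ≤ y → ((s^2 + y^2 = n) ↔ y = p) := fun y hy =>
    ⟨fun h => pv_key y p hy hp (by linarith), fun h => by rw [h]; linarith⟩
  have hnonneg : ∀ x ∈ [p,q,r,s], (0:Int) ≤ x := by
    intro x hx
    simp only [List.mem_cons, List.not_mem_nil, or_false] at hx
    rcases hx with rfl | rfl | rfl | rfl <;> assumption
  rw [show (PySem.List.pyRange 0 (PySem.List.len [p,q,r,s]) 1 : List Int) = [0,1,2,3] by
    rw [show PySem.List.len [p,q,r,s] = 4 by simp [PySem.List.len_eq]]; decide]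
  show ([p,q,r,s].foldl (pvStep n s)
          ([p,q,r,s].foldl (pvStep n r)
            ([p,q,r,s].foldl (pvStep n q)
              ([p,q,r,s].foldl (pvStep n p) []) ))) = _
  rw [pv_fold_add n p s [p,q,r,s] [] (fun x hx => c0 x (hnonneg x hx)) (by simp)]
  simp only [List.not_mem_nil, if_false, List.nil_append]
  rw [pv_fold_add n q r [p,q,r,s] _ (fun x hx => c1 x (hnonneg x hx)) (by simp)]
  have hQc : [min r q, max r q] = [min q r, max q r] := by rw [min_comm, max_comm]
  have hPc : [min s p, max s p] = [min p s, max p s] := by rw [min_comm, max_comm]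
  by_cases hPQ : [min p s, max p s] = [min r q, max r q]
  · have hQP : [min q r, max q r] ∈ [[min p s, max p s]] := by
      simp [hPQ, hQc]
    rw [if_pos hQP]
    rw [pv_fold_mem n r q [p,q,r,s] _ (fun x hx => c2 x (hnonneg x hx)) (by simp [← hPQ])]
    rw [pv_fold_mem n s p [p,q,r,s] _ (fun x hx => c3 x (hnonneg x hx)) (by simp [hPc])]
    rw [if_pos hPQ]
  · have hQP : [min q r, max q r] ∉ [[min p s, max p s]] := by
      simp only [List.mem_singleton]
      intro h
      exact hPQ (by rw [hQc]; exact h.symm)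
    rw [if_neg hQP]
    rw [pv_fold_mem n r q [p,q,r,s] _ (fun x hx => c2 x (hnonneg x hx)) (by simp [← hQc])]
    rw [pv_fold_mem n s p [p,q,r,s] _ (fun x hx => c3 x (hnonneg x hx)) (by simp [hPc])]
    rw [if_neg hPQ]
    simp [hQc]

-- ===== VERDICT (by name: the statement is the Claim_ definition above) =====
theorem prod2sum_spec : Claim_equal_prod2sum := by
  unfold Claim_equal_prod2sum
  intro a b c d _
  unfold Spec_prod2sum
  have h := pv_core (|a*c+b*d|) (|a*d+b*c|) (|a*c-b*d|) (|a*d-b*c|) ((a*a + b*b) * (c*c + d*d))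
    (abs_nonneg _) (abs_nonneg _) (abs_nonneg _) (abs_nonneg _)
    (by rw [sq_abs, sq_abs]; ring) (by rw [sq_abs, sq_abs]; ring)
  exact congrArg (fun l => PySem.List.sorted l (fun x => x) false) h
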